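-- pv_equiv track=rewrite | github.com/fixxxera/OceaniaCruises | main.py | split_carib
-- ===== SOURCE A (Python) =====
-- def split_carib(ports):
--     cu = ['Santiago de Cuba', 'Cienfuegos', 'Havana']
--     wc = ['Costa Maya', 'Cozumel', 'Falmouth, Jamaica', 'George Town, Grand Cayman',
--           'Ocho Rios']
--
--     ec = ['Basseterre, St. Kitts', 'Bridgetown', 'Castries', 'Charlotte Amalie, St. Thomas',
--           'Fort De France', 'Kingstown, St. Vincent', 'Philipsburg', 'Ponce, Puerto Rico',
--           'Punta Cana, Dominican Rep', 'Roseau', 'San Juan', 'St. Croix, U.S.V.I.',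
--           "St. George's", "St. John's", 'Tortola, B.V.I']
--
--     bm = ['Kings Wharf, Bermuda']
--     result = []
--     iscu = False
--     isec = False
--     iswc = False
--     ports_list = []
--     for i in range(len(ports)):
--         if i == 0:
--             pass
--         else:
--             ports_list.append(ports[i]['name'])
--     for element in cu:
--         for p in ports_list:
--             if p in element:
--                 iscu = True
--     if not iscu:
--         for element in wc:
--             for p in ports_list:
--                 if p in element:
--                     iswc = True
--     if not iswc:
--         for element in ec:
--             for p in ports_list:
--                 if p in element:
--                     isec = True
--     if iscu:
--         result.append("Cuba")
--         result.append("C")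
--         result.append("CU")
--         return result
--     elif iswc:
--         result.append("West Carib")
--         result.append("C")
--         result.append("WC")
--         return result
--     elif isec:
--         result.append("East Carib")
--         result.append("C")
--         result.append("EC")
--         return result
--     else:
--         result.append("Carib")
--         result.append("C")
--         result.append("")
--         return result
-- ===== SOURCE B (Python) =====
-- def split_carib(ports):
--     CU = ['Santiago de Cuba', 'Cienfuegos', 'Havana']
--     WC = ['Costa Maya', 'Cozumel', 'Falmouth, Jamaica', 'George Town, Grand Cayman',
--           'Ocho Rios']
--     EC = ['Basseterre, St. Kitts', 'Bridgetown', 'Castries', 'Charlotte Amalie, St. Thomas',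
--           'Fort De France', 'Kingstown, St. Vincent', 'Philipsburg', 'Ponce, Puerto Rico',
--           'Punta Cana, Dominican Rep', 'Roseau', 'San Juan', 'St. Croix, U.S.V.I.',
--           "St. George's", "St. John's", 'Tortola, B.V.I']
--     CATS = [(s, 0) for s in CU] + [(s, 1) for s in WC] + [(s, 2) for s in EC]
--     LABELS = [["Cuba", "C", "CU"], ["West Carib", "C", "WC"],
--               ["East Carib", "C", "EC"], ["Carib", "C", ""]]
--     rank = min((r for p in ports[1:] for (s, r) in CATS if p['name'] in s), default=3)
--     return LABELS[rank]
-- ===== Notes on version B (the rewrite author's own statement) =====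
-- stated objective: alternative
-- what changed: Replaced the three staged boolean-flag scans and the if/elif cascade by a single min-rank computation: a flat (category string, rank) table is scanned once per port name collecting the ranks of matching categories, and the answer is the label indexed by the minimum rank (default 3).
import Mathlib
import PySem

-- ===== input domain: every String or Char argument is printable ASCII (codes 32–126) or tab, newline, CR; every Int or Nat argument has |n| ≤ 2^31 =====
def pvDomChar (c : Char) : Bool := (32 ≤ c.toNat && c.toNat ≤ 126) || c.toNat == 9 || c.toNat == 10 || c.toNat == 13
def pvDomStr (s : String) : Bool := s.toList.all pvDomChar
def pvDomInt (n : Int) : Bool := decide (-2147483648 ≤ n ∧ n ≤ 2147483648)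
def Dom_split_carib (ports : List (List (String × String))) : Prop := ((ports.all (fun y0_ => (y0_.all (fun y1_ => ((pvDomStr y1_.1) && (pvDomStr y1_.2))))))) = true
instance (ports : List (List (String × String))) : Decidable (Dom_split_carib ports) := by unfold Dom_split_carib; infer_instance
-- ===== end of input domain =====

-- B replaces A's three staged flag scans and if/elif cascade by one min-rank computation over a flat (string, rank) table: alternative decomposition, same cost.


def pv_cu : List String := ["Santiago de Cuba", "Cienfuegos", "Havana"]
def pv_wc : List String := ["Costa Maya", "Cozumel", "Falmouth, Jamaica", "George Town, Grand Cayman",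
  "Ocho Rios"]
def pv_ec : List String := ["Basseterre, St. Kitts", "Bridgetown", "Castries", "Charlotte Amalie, St. Thomas",
  "Fort De France", "Kingstown, St. Vincent", "Philipsburg", "Ponce, Puerto Rico",
  "Punta Cana, Dominican Rep", "Roseau", "San Juan", "St. Croix, U.S.V.I.",
  "St. George's", "St. John's", "Tortola, B.V.I"]

-- ===== PORT A =====
-- ports[i]['name'] raises KeyError when 'name' is absent; Pre_ excludes that, so .getD "" is never taken on Pre_.
def split_carib (ports : List (List (String × String))) : List String :=
  let ports_list : List String :=
    (PySem.List.pyRange 0 (ports.length : Int) 1).foldl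
      (fun acc i =>
        if i == 0 then acc
        else acc ++ [(PySem.Dict.get? (PySem.Dict.mk (PySem.List.pyGetD ports i [])) "name").getD ""]) []
  let iscu : Bool :=
    pv_cu.foldl (fun b element =>
      ports_list.foldl (fun b p => if PySem.Str.isIn p element then true else b) b) false
  let iswc : Bool :=
    if !iscu then
      pv_wc.foldl (fun b element =>
        ports_list.foldl (fun b p => if PySem.Str.isIn p element then true else b) b) false
    else false
  let isec : Bool :=
    if !iswc then
      pv_ec.foldl (fun b element =>
        ports_list.foldl (fun b p => if PySem.Str.isIn p element then true else b) b) false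
    else false
  if iscu then ["Cuba", "C", "CU"]
  else if iswc then ["West Carib", "C", "WC"]
  else if isec then ["East Carib", "C", "EC"]
  else ["Carib", "C", ""]

-- ===== PORT B =====
def pv_cats : List (String × Nat) :=
  pv_cu.map (fun s => (s, 0)) ++ pv_wc.map (fun s => (s, 1)) ++ pv_ec.map (fun s => (s, 2))
def pv_labels : List (List String) :=
  [["Cuba", "C", "CU"], ["West Carib", "C", "WC"], ["East Carib", "C", "EC"], ["Carib", "C", ""]]

-- p['name'] raises KeyError when absent; Pre_ excludes that, so .getD "" is never taken on Pre_.
-- LABELS[rank] is always in range (rank ≤ 3, 4 labels), so List.getD is exact here.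
def split_carib_alt (ports : List (List (String × String))) : List String :=
  let ranks : List Nat :=
    (ports.drop 1).flatMap (fun p =>
      pv_cats.filterMap (fun sr =>
        if PySem.Str.isIn ((PySem.Dict.get? (PySem.Dict.mk p) "name").getD "") sr.1
        then some sr.2 else none))
  let rank : Nat :=
    match PySem.List.min? ranks (fun r => r) with
    | some m => m
    | none => 3
  pv_labels.getD rank []

-- ===== PRECONDITION & SPEC =====
-- Pre_ excludes inputs where some port dict after the first lacks the key 'name' (KeyError in both A and B).
def Pre_split_carib (ports : List (List (String × String))) : Prop :=
  ((ports.drop 1).all (fun p => (PySem.Dict.get? (PySem.Dict.mk p) "name").isSome)) = true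
instance (ports : List (List (String × String))) : Decidable (Pre_split_carib ports) := by unfold Pre_split_carib; infer_instance
def pvWitness_split_carib : (List (List (String × String))) := [[("x", "y")], [("name", "Havana")]]
def Spec_split_carib (ports : List (List (String × String))) (out : List String) : Prop := out = split_carib_alt ports
instance (ports : List (List (String × String))) (out : List String) : Decidable (Spec_split_carib ports out) := by unfold Spec_split_carib; infer_instance

-- ===== CLAIM (what is proved, stated in full; the proofs are below) =====
def Claim_equal_split_carib : Prop := ∀ (ports : List (List (String × String))), Dom_split_carib ports → Pre_split_carib ports → Spec_split_carib ports (split_carib ports)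

-- ===== LEMMAS AND PROOFS =====

-- A's inner flag loop is an 'or' accumulator
theorem pv_foldl_orif {α : Type} (f : α → Bool) : ∀ (l : List α) (b : Bool),
    l.foldl (fun b x => if f x then true else b) b = (b || l.any f) := by
  intro l
  induction l with
  | nil => simp
  | cons x xs ih =>
    intro b
    simp only [List.foldl_cons, List.any_cons, ih]
    cases f x <;> simp

theorem pv_foldl_or {α : Type} (g : α → Bool) : ∀ (l : List α) (b : Bool),
    l.foldl (fun b x => b || g x) b = (b || l.any g) := by
  intro l
  induction l with
  | nil => simp
  | cons x xs ih =>
    intro b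
    simp only [List.foldl_cons, List.any_cons, ih]
    cases g x <;> simp

-- A's nested flag loops compute 'some category string contains some port name'
theorem pv_flag_eq (cat names : List String) :
    cat.foldl (fun b element =>
      names.foldl (fun b p => if PySem.Str.isIn p element then true else b) b) false
    = cat.any (fun e => names.any (fun n => PySem.Str.isIn n e)) := by
  have h : ∀ b, cat.foldl (fun b element =>
      names.foldl (fun b p => if PySem.Str.isIn p element then true else b) b) b
      = (b || cat.any (fun e => names.any (fun n => PySem.Str.isIn n e))) := by
    intro b
    have := pv_foldl_or (fun e => names.any (fun n => PySem.Str.isIn n e)) cat b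
    rw [← this]
    apply PySem.List.foldl_congr_mem
    intro acc x _
    rw [pv_foldl_orif]
  simpa using h false

-- A's index loop builds exactly the name list of the ports after the first
theorem pv_names_eq (ports : List (List (String × String))) :
    (PySem.List.pyRange 0 (ports.length : Int) 1).foldl
      (fun acc i =>
        if i == 0 then acc
        else acc ++ [(PySem.Dict.get? (PySem.Dict.mk (PySem.List.pyGetD ports i [])) "name").getD ""]) []
    = (ports.drop 1).map (fun p => (PySem.Dict.get? (PySem.Dict.mk p) "name").getD "") := by
  cases ports with
  | nil => simp [PySem.List.pyRange_one_eq_nil]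
  | cons hd tl =>
    rw [PySem.List.pyRange_one_cons (by simp)]
    simp only [List.foldl_cons]
    norm_num
    have hcong : (PySem.List.pyRange 1 ((tl.length : Int) + 1) 1).foldl
        (fun acc i =>
          if i = 0 then acc
          else acc ++ [(PySem.Dict.get? (PySem.Dict.mk (PySem.List.pyGetD (hd :: tl) i [])) "name").getD ""]) []
        = (PySem.List.pyRange 1 ((tl.length : Int) + 1) 1).foldl
        (fun acc i => acc ++ [(PySem.Dict.get? (PySem.Dict.mk (PySem.List.pyGetD (hd :: tl) i [])) "name").getD ""]) [] := by
      apply PySem.List.foldl_congr_mem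
      intro acc i hi
      rw [PySem.List.mem_pyRange_one] at hi
      have hne : ¬ i = 0 := by omega
      simp [hne]
    rw [hcong,
      show ((tl.length : Int) + 1) = ((hd :: tl).length : Int) by push_cast [List.length_cons]; ring]
    rw [PySem.List.foldl_pyRange_pyGetD' (a := 1) (xs := hd :: tl) (d := [])
        (f := fun acc p => acc ++ [(PySem.Dict.get? (PySem.Dict.mk p) "name").getD ""]) (init := []) (by norm_num),
      PySem.List.foldl_append_singleton_eq_map]
    rfl

-- membership in B's flat rank list, by category rank
theorem pv_mem_ranks (names : List String) (k : Nat) :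
    (k ∈ names.flatMap (fun n => pv_cats.filterMap (fun sr =>
        if PySem.Str.isIn n sr.1 then some sr.2 else none)))
    ↔ ∃ n ∈ names, ∃ sr ∈ pv_cats, PySem.Str.isIn n sr.1 = true ∧ sr.2 = k := by
  simp only [List.mem_flatMap, List.mem_filterMap]
  constructor
  · rintro ⟨n, hn, sr, hsr, h⟩
    split_ifs at h with hc
    · exact ⟨n, hn, sr, hsr, hc, Option.some.inj h⟩
  · rintro ⟨n, hn, sr, hsr, hc, hk⟩
    exact ⟨n, hn, sr, hsr, by rw [if_pos hc, hk]⟩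

theorem pv_cats_cases (sr : String × Nat) (h : sr ∈ pv_cats) :
    (sr.2 = 0 ∧ sr.1 ∈ pv_cu) ∨ (sr.2 = 1 ∧ sr.1 ∈ pv_wc) ∨ (sr.2 = 2 ∧ sr.1 ∈ pv_ec) := by
  simp only [pv_cats, List.mem_append, List.mem_map] at h
  rcases h with (⟨s, hs, rfl⟩ | ⟨s, hs, rfl⟩) | ⟨s, hs, rfl⟩
  · exact Or.inl ⟨rfl, hs⟩
  · exact Or.inr (Or.inl ⟨rfl, hs⟩)
  · exact Or.inr (Or.inr ⟨rfl, hs⟩)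

theorem pv_rank_iff (names cat : List String) (k : Nat)
    (h1 : ∀ sr ∈ pv_cats, sr.2 = k → sr.1 ∈ cat)
    (h2 : ∀ s ∈ cat, (s, k) ∈ pv_cats) :
    (k ∈ names.flatMap (fun n => pv_cats.filterMap (fun sr =>
        if PySem.Str.isIn n sr.1 then some sr.2 else none)))
      ↔ cat.any (fun e => names.any (fun n => PySem.Str.isIn n e)) = true := by
  rw [pv_mem_ranks]
  simp only [List.any_eq_true]
  constructor
  · rintro ⟨n, hn, sr, hsr, hc, hk⟩
    exact ⟨sr.1, h1 sr hsr hk, n, hn, hc⟩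
  · rintro ⟨e, he, n, hn, hc⟩
    exact ⟨n, hn, (e, k), h2 e he, hc, rfl⟩

theorem pv_rank_le (k : Nat) (names : List String)
    (h : k ∈ names.flatMap (fun n => pv_cats.filterMap (fun sr =>
        if PySem.Str.isIn n sr.1 then some sr.2 else none))) : k ≤ 2 := by
  rw [pv_mem_ranks] at h
  obtain ⟨n, _, sr, hsr, _, hk⟩ := h
  rcases pv_cats_cases sr hsr with ⟨h2, _⟩ | ⟨h2, _⟩ | ⟨h2, _⟩ <;> omega

-- ===== VERDICT (by name: the statement is the Claim_ definition above) =====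
theorem split_carib_spec : Claim_equal_split_carib := by
  intro ports _ _
  unfold Spec_split_carib split_carib split_carib_alt
  simp only [pv_names_eq, pv_flag_eq]
  rw [← List.flatMap_map (f := fun p => (PySem.Dict.get? (PySem.Dict.mk p) "name").getD "")
      (g := fun n => pv_cats.filterMap (fun sr =>
        if PySem.Str.isIn n sr.1 then some sr.2 else none))]
  set names := (ports.drop 1).map (fun p => (PySem.Dict.get? (PySem.Dict.mk p) "name").getD "") with hn
  set ranks := names.flatMap (fun n => pv_cats.filterMap (fun sr =>
      if PySem.Str.isIn n sr.1 then some sr.2 else none)) with hr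
  have hiff : ∀ (k : Nat) (cat : List String),
      (∀ sr ∈ pv_cats, sr.2 = k → sr.1 ∈ cat) → (∀ s ∈ cat, (s, k) ∈ pv_cats) →
      ((k ∈ ranks) ↔ cat.any (fun e => names.any (fun n => PySem.Str.isIn n e)) = true) :=
    fun k cat h1 h2 => pv_rank_iff names cat k h1 h2
  have h0 := hiff 0 pv_cu
    (fun sr hsr hk => by
      rcases pv_cats_cases sr hsr with ⟨h2, h3⟩ | ⟨h2, _⟩ | ⟨h2, _⟩
      · exact h3
      · exfalso; omega
      · exfalso; omega)
    (fun s hs => by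
      simp only [pv_cats, List.mem_append, List.mem_map]
      exact Or.inl (Or.inl ⟨s, hs, rfl⟩))
  have h1 := hiff 1 pv_wc
    (fun sr hsr hk => by
      rcases pv_cats_cases sr hsr with ⟨h2, _⟩ | ⟨h2, h3⟩ | ⟨h2, _⟩
      · exfalso; omega
      · exact h3
      · exfalso; omega)
    (fun s hs => by
      simp only [pv_cats, List.mem_append, List.mem_map]
      exact Or.inl (Or.inr ⟨s, hs, rfl⟩))
  have h2 := hiff 2 pv_ec
    (fun sr hsr hk => by
      rcases pv_cats_cases sr hsr with ⟨h2, _⟩ | ⟨h2, _⟩ | ⟨h2, h3⟩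
      · exfalso; omega
      · exfalso; omega
      · exact h3)
    (fun s hs => by
      simp only [pv_cats, List.mem_append, List.mem_map]
      exact Or.inr ⟨s, hs, rfl⟩)
  cases hcu : pv_cu.any (fun e => names.any (fun n => PySem.Str.isIn n e)) with
  | true =>
    have hm0 : 0 ∈ ranks := h0.mpr hcu
    obtain ⟨m, hm⟩ : ∃ m, PySem.List.min? ranks (fun r => r) = some m := by
      cases hmin : PySem.List.min? ranks (fun r => r) with
      | none =>
        exfalso
        rw [PySem.List.min?_eq_none_iff] at hmin
        simp [hmin] at hm0
      | some m => exact ⟨m, rfl⟩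
    have : m = 0 := Nat.le_zero.mp (PySem.List.min?_isMin hm 0 hm0)
    simp [hm, this, pv_labels]
  | false =>
    cases hwc : pv_wc.any (fun e => names.any (fun n => PySem.Str.isIn n e)) with
    | true =>
      have hm1 : 1 ∈ ranks := h1.mpr hwc
      have hn0 : ¬ (0 ∈ ranks) := fun h => by rw [h0, hcu] at h; cases h
      obtain ⟨m, hm⟩ : ∃ m, PySem.List.min? ranks (fun r => r) = some m := by
        cases hmin : PySem.List.min? ranks (fun r => r) with
        | none =>
          exfalso
          rw [PySem.List.min?_eq_none_iff] at hmin
          simp [hmin] at hm1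
        | some m => exact ⟨m, rfl⟩
      have hle : m ≤ 1 := PySem.List.min?_isMin hm 1 hm1
      have hmem : m ∈ ranks := PySem.List.min?_mem hm
      have : m = 1 := by
        rcases Nat.lt_or_ge m 1 with h | h
        · exact absurd hmem (by simpa [Nat.lt_one_iff.mp h] using hn0)
        · omega
      simp [hm, this, pv_labels]
    | false =>
      cases hec : pv_ec.any (fun e => names.any (fun n => PySem.Str.isIn n e)) with
      | true =>
        have hm2 : 2 ∈ ranks := h2.mpr hec
        have hn0 : ¬ (0 ∈ ranks) := fun h => by rw [h0, hcu] at h; cases h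
        have hn1 : ¬ (1 ∈ ranks) := fun h => by rw [h1, hwc] at h; cases h
        obtain ⟨m, hm⟩ : ∃ m, PySem.List.min? ranks (fun r => r) = some m := by
          cases hmin : PySem.List.min? ranks (fun r => r) with
          | none =>
            exfalso
            rw [PySem.List.min?_eq_none_iff] at hmin
            simp [hmin] at hm2
          | some m => exact ⟨m, rfl⟩
        have hle : m ≤ 2 := PySem.List.min?_isMin hm 2 hm2
        have hmem : m ∈ ranks := PySem.List.min?_mem hm
        have : m = 2 := by
          interval_cases m
          · exact absurd hmem hn0
          · exact absurd hmem hn1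
          · rfl
        simp [hm, this, pv_labels]
      | false =>
        have hempty : ranks = [] := by
          rcases hranks : ranks with _ | ⟨r, rs⟩
          · rfl
          · exfalso
            have hmem : r ∈ ranks := by rw [hranks]; exact List.mem_cons_self ..
            have hle : r ≤ 2 := pv_rank_le r names (by rw [hr] at hmem; exact hmem)
            interval_cases r
            · exact (fun h => by rw [h0, hcu] at h; cases h) hmem
            · exact (fun h => by rw [h1, hwc] at h; cases h) hmem
            · exact (fun h => by rw [h2, hec] at h; cases h) hmem
        have : PySem.List.min? ranks (fun r => r) = none := by
          rw [PySem.List.min?_eq_none_iff]; exact hempty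
        simp [this, pv_labels]
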